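-- pv_equiv track=rewrite | github.com/chaeonee/baekjoon | Python/21608_상어 초등학교.py | check
-- ===== SOURCE A (Python) =====
-- def check(N, friends, room):
-- 	dirs = [[0,-1],[0,1],[-1,0],[1,0]]
--
-- 	n = [-1,-1]
-- 	x, y = -1, -1
-- 	for i in range(N):
-- 		for j in range(N):
-- 			if room[i][j]:
-- 				continue
--
-- 			tmp = [0,0]
-- 			for di, dj in dirs:
-- 				di += i
-- 				dj += j
-- 				if 0 <= di < N and 0 <= dj < N:
-- 					if room[di][dj] == 0:
-- 						tmp[1] += 1
-- 					elif room[di][dj] in friends: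
-- 						tmp[0] += 1
--
-- 			if n[0] < tmp[0]:
-- 				x, y = i, j
-- 				n = [t for t in tmp]
-- 			elif n[0] == tmp[0] and n[1] < tmp[1]:
-- 				x, y = i, j
-- 				n = [t for t in tmp]
--
-- 	return x, y
-- ===== SOURCE B (Python) =====
-- def check(N, friends, room):
--     fs = set(friends)
--
--     def nbrs(c):
--         i, j = c
--         return [room[a][b] for a, b in ((i, j - 1), (i, j + 1), (i - 1, j), (i + 1, j))
--                 if 0 <= a < N and 0 <= b < N]
--
--     def fcnt(c):
--         return sum(1 for v in nbrs(c) if v != 0 and v in fs)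
--
--     def ecnt(c):
--         return sum(1 for v in nbrs(c) if v == 0)
--
--     cells = [(i, j) for i in range(N) for j in range(N) if room[i][j] == 0]
--     if not cells:
--         return -1, -1
--     # staged arg-max: best friend count first, then best empty count within that tier,
--     # then the first (row-major) cell of the tier achieving it
--     best_f = max(fcnt(c) for c in cells)
--     tier = [c for c in cells if fcnt(c) == best_f]
--     best_e = max(ecnt(c) for c in tier)
--     return next(c for c in tier if ecnt(c) == best_e)
-- ===== Notes on version B (the rewrite author's own statement) =====
-- stated objective: alternative
-- what changed: Replaces A's single scan with a mutable running-best (n/x/y updated through an elif tie-break chain) by a staged arg-max: one pass for the maximal friend count, a filter to that tier, one pass for the maximal empty-neighbour count within it, then the first (row-major) tier cell achieving it; friend membership goes through a set.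
import Mathlib
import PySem

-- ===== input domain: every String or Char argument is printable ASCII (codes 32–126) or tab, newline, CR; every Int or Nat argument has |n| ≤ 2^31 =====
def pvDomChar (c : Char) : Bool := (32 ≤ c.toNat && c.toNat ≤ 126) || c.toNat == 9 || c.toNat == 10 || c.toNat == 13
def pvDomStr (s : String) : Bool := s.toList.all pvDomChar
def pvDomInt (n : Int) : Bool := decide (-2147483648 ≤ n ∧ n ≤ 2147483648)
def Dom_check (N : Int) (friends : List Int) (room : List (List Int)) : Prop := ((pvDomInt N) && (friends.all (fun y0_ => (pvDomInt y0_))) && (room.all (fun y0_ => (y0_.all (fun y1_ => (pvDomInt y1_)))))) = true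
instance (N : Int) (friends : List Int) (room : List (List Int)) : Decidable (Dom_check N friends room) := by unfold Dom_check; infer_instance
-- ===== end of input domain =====

-- B replaces A's single scan with a running best by a staged arg-max: first the maximal
-- friend count over all empty cells, then the maximal empty-neighbour count within that
-- tier, then the first (row-major) tier cell achieving both (objective: alternative).

-- ===== PORT A =====
-- room[i][j]; total via a default, exact on in-range indices (Pre_check keeps all accesses in range)
def getv (room : List (List Int)) (i j : Int) : Int :=
  PySem.List.pyGetD (PySem.List.pyGetD room i []) j 0

def check (N : Int) (friends : List Int) (room : List (List Int)) : Int × Int :=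
  let dirs : List (Int × Int) := [(0, -1), (0, 1), (-1, 0), (1, 0)]
  let s := (PySem.List.pyRange 0 N 1).foldl (fun (s : Int × Int × Int × Int) i =>
    (PySem.List.pyRange 0 N 1).foldl (fun s j =>
      if getv room i j ≠ 0 then s
      else
        let tmp : Int × Int := dirs.foldl (fun t d =>
          let di := d.1 + i
          let dj := d.2 + j
          if 0 ≤ di ∧ di < N ∧ 0 ≤ dj ∧ dj < N then
            if getv room di dj = 0 then (t.1, t.2 + 1)
            else if getv room di dj ∈ friends then (t.1 + 1, t.2)
            else t
          else t) (0, 0)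
        if s.1 < tmp.1 then (tmp.1, tmp.2, i, j)
        else if s.1 = tmp.1 ∧ s.2.1 < tmp.2 then (tmp.1, tmp.2, i, j)
        else s) s) ((-1, -1, -1, -1) : Int × Int × Int × Int)
  (s.2.2.1, s.2.2.2)

-- ===== PORT B =====
-- nbrs(c) of Source B: values of the in-bounds neighbours of cell c
def nbrsB (N : Int) (room : List (List Int)) (c : Int × Int) : List Int :=
  ([(c.1, c.2 - 1), (c.1, c.2 + 1), (c.1 - 1, c.2), (c.1 + 1, c.2)].filter
    (fun p => decide (0 ≤ p.1 ∧ p.1 < N ∧ 0 ≤ p.2 ∧ p.2 < N))).map (fun p => getv room p.1 p.2)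

def fcntB (N : Int) (fs : List Int) (room : List (List Int)) (c : Int × Int) : Int :=
  (((nbrsB N room c).filter (fun v => decide (v ≠ 0 ∧ v ∈ fs))).length : Int)

def ecntB (N : Int) (room : List (List Int)) (c : Int × Int) : Int :=
  (((nbrsB N room c).filter (fun v => decide (v = 0))).length : Int)

def tierPick (N : Int) (room : List (List Int)) : List (Int × Int) → Int × Int
  | [] => (-1, -1)   -- unreachable: best_f is attained on cells
  | t0 :: trest =>
    -- best_e = max(ecnt(c) for c in tier)
    let bestE := (trest.map (ecntB N room)).foldl max (ecntB N room t0)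
    -- next(c for c in tier if ecnt(c) == best_e)
    match (t0 :: trest).find? (fun c => ecntB N room c == bestE) with
    | some c => c
    | none => (-1, -1)   -- unreachable: best_e is attained on the tier

def pickB (N : Int) (fs : List Int) (room : List (List Int)) : List (Int × Int) → Int × Int
  | [] => (-1, -1)
  | c0 :: rest =>
    -- best_f = max(fcnt(c) for c in cells)
    let bestF := (rest.map (fcntB N fs room)).foldl max (fcntB N fs room c0)
    -- tier = [c for c in cells if fcnt(c) == best_f]
    tierPick N room ((c0 :: rest).filter (fun c => fcntB N fs room c == bestF))

def check_alt (N : Int) (friends : List Int) (room : List (List Int)) : Int × Int :=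
  let fs : PySem.Set Int := PySem.Set.ofList friends
  let cells := (PySem.List.pyRange 0 N 1).flatMap (fun i =>
    ((PySem.List.pyRange 0 N 1).filter (fun j => decide (getv room i j = 0))).map (fun j => (i, j)))
  pickB N fs room cells

-- ===== PRECONDITION & SPEC =====
-- Pre_check excludes exactly the inputs where Python A raises IndexError: when N > 0,
-- the room must have at least N rows and each of its first N rows at least N entries.
def Pre_check (N : Int) (friends : List Int) (room : List (List Int)) : Prop :=
  0 < N → (N ≤ (room.length : Int) ∧ ∀ r ∈ room.take N.toNat, N ≤ (r.length : Int))
instance (N : Int) (friends : List Int) (room : List (List Int)) : Decidable (Pre_check N friends room) := by unfold Pre_check; infer_instance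

def pvWitness_check : Int × List Int × List (List Int) := (2, [3], [[0, 0], [3, 0]])

def Spec_check (N : Int) (friends : List Int) (room : List (List Int)) (out : Int × Int) : Prop := out = check_alt N friends room
instance (N : Int) (friends : List Int) (room : List (List Int)) (out : Int × Int) : Decidable (Spec_check N friends room out) := by unfold Spec_check; infer_instance

-- ===== CLAIM (what is proved, stated in full; the proofs are below) =====
def Claim_equal_check : Prop := ∀ (N : Int) (friends : List Int) (room : List (List Int)), Dom_check N friends room → Pre_check N friends room → Spec_check N friends room (check N friends room)

-- ===== LEMMAS AND PROOFS =====

-- lexicographic < on (friend count, empty count)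
def keyLt (a b : Int × Int) : Bool :=
  a.1 < b.1 || (a.1 == b.1 && a.2 < b.2)

theorem keyLt_iff (a b : Int × Int) :
    keyLt a b = true ↔ (a.1 < b.1 ∨ (a.1 = b.1 ∧ a.2 < b.2)) := by
  simp [keyLt]

theorem keyLt_irrefl (a : Int × Int) : keyLt a a = false := by
  simp [keyLt]

theorem keyLt_asym {a b : Int × Int} (h : keyLt a b = true) : keyLt b a = false := by
  rw [keyLt_iff] at h
  rw [Bool.eq_false_iff, ne_eq, keyLt_iff]
  omega

theorem keyLt_trans_false {a b c : Int × Int} (h1 : keyLt a b = false)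
    (h2 : keyLt b c = false) : keyLt a c = false := by
  rw [Bool.eq_false_iff, ne_eq, keyLt_iff] at h1 h2 ⊢
  omega

theorem keyLt_trans {a b c : Int × Int} (h1 : keyLt a b = true)
    (h2 : keyLt b c = true) : keyLt a c = true := by
  rw [keyLt_iff] at h1 h2 ⊢
  omega

-- A's running-best update, with the per-cell key abstracted out
def stepA (k : Int × Int → Int × Int) (s : Int × Int × Int × Int) (c : Int × Int) : Int × Int × Int × Int :=
  if s.1 < (k c).1 then ((k c).1, (k c).2, c.1, c.2)
  else if s.1 = (k c).1 ∧ s.2.1 < (k c).2 then ((k c).1, (k c).2, c.1, c.2)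
  else s

def pack (k : Int × Int → Int × Int) (m : Int × Int) : Int × Int × Int × Int :=
  ((k m).1, (k m).2, m.1, m.2)

-- first maximum under keyLt, left to right (replace only on strictly greater)
def fmL (k : Int × Int → Int × Int) (m : Int × Int) : List (Int × Int) → Int × Int
  | [] => m
  | c :: l => fmL k (if keyLt (k m) (k c) then c else m) l

theorem step_pack (k : Int × Int → Int × Int) (m c : Int × Int) :
    stepA k (pack k m) c = pack k (if keyLt (k m) (k c) then c else m) := by
  simp only [stepA, pack, keyLt, Bool.or_eq_true, Bool.and_eq_true, decide_eq_true_eq,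
    beq_iff_eq]
  split_ifs <;> simp_all <;> omega

theorem fold_pack (k : Int × Int → Int × Int) :
    ∀ (l : List (Int × Int)) (m : Int × Int),
      l.foldl (stepA k) (pack k m) = pack k (fmL k m l) := by
  intro l
  induction l with
  | nil => intro m; rfl
  | cons c l ih =>
    intro m
    rw [List.foldl_cons, step_pack, fmL]
    exact ih _

theorem first_step (k : Int × Int → Int × Int) (c : Int × Int) (h : 0 ≤ (k c).1) :
    stepA k ((-1, -1, -1, -1) : Int × Int × Int × Int) c = pack k c := by
  simp only [stepA, pack]
  rw [if_pos (by omega)]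

theorem fmL_mem (k : Int × Int → Int × Int) :
    ∀ (l : List (Int × Int)) (m : Int × Int), fmL k m l ∈ m :: l := by
  intro l
  induction l with
  | nil => intro m; simp [fmL]
  | cons c l ih =>
    intro m
    rw [fmL]
    rcases List.mem_cons.1 (ih (if keyLt (k m) (k c) then c else m)) with h | h
    · rw [h]; split <;> simp
    · simp [h]

theorem fmL_ge (k : Int × Int → Int × Int) :
    ∀ (l : List (Int × Int)) (m : Int × Int), ∀ x ∈ m :: l,
      keyLt (k (fmL k m l)) (k x) = false := by
  intro l
  induction l with
  | nil =>
    intro m x hx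
    rw [List.mem_singleton] at hx
    subst hx
    exact keyLt_irrefl _
  | cons c l ih =>
    intro m x hx
    rw [fmL]
    have hm' : keyLt (k (if keyLt (k m) (k c) then c else m)) (k m) = false ∧
        keyLt (k (if keyLt (k m) (k c) then c else m)) (k c) = false := by
      by_cases hk : keyLt (k m) (k c) = true
      · rw [if_pos hk]
        exact ⟨keyLt_asym hk, keyLt_irrefl _⟩
      · rw [if_neg hk]
        exact ⟨keyLt_irrefl _, Bool.eq_false_iff.2 hk⟩
    have hbase := ih (if keyLt (k m) (k c) then c else m)
    have hself : keyLt (k (fmL k (if keyLt (k m) (k c) then c else m) l)) 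
        (k (if keyLt (k m) (k c) then c else m)) = false :=
      hbase _ (by simp)
    rcases List.mem_cons.1 hx with h | h
    · subst h
      exact keyLt_trans_false hself hm'.1
    · rcases List.mem_cons.1 h with h | h
      · subst h
        exact keyLt_trans_false hself hm'.2
      · exact hbase x (by simp [h])

theorem fmL_self_or_find (k : Int × Int → Int × Int) :
    ∀ (l : List (Int × Int)) (m : Int × Int),
      fmL k m l = m ∨ (keyLt (k m) (k (fmL k m l)) = true ∧
        l.find? (fun x => k x == k (fmL k m l)) = some (fmL k m l)) := by
  intro l
  induction l with
  | nil => intro m; left; rfl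
  | cons c l ih =>
    intro m
    rw [fmL]
    by_cases hk : keyLt (k m) (k c) = true
    · rw [if_pos hk]
      right
      rcases ih c with h | ⟨h1, h2⟩
      · rw [h]
        exact ⟨hk, List.find?_cons_of_pos (by simp)⟩
      · refine ⟨keyLt_trans hk h1, ?_⟩
        rw [List.find?_cons_of_neg, h2]
        simp only [beq_iff_eq]
        intro hce
        rw [hce] at h1
        rw [keyLt_irrefl] at h1
        exact Bool.false_ne_true h1
    · rw [if_neg hk]
      rcases ih m with h | ⟨h1, h2⟩
      · left; exact h
      · right
        refine ⟨h1, ?_⟩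
        rw [List.find?_cons_of_neg, h2]
        simp only [beq_iff_eq]
        intro hce
        rw [hce] at hk
        exact hk h1

theorem find_head (k : Int × Int → Int × Int) (c0 : Int × Int) (rest : List (Int × Int)) :
    (c0 :: rest).find? (fun x => k x == k (fmL k c0 rest)) = some (fmL k c0 rest) := by
  rcases fmL_self_or_find k rest c0 with h | ⟨h1, h2⟩
  · rw [h]
    exact List.find?_cons_of_pos (by simp)
  · rw [List.find?_cons_of_neg, h2]
    simp only [beq_iff_eq]
    intro hce
    rw [hce] at h1
    rw [keyLt_irrefl] at h1
    exact Bool.false_ne_true h1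

-- the per-cell count: A's fold over dirs computes the two filtered counts
theorem count_fold (g : Int × Int → Int) (inb : Int × Int → Prop) [DecidablePred inb]
    (fr : List Int) :
    ∀ (ps : List (Int × Int)) (a b : Int),
    ps.foldl (fun (t : Int × Int) p =>
        if inb p then
          if g p = 0 then (t.1, t.2 + 1)
          else if g p ∈ fr then (t.1 + 1, t.2)
          else t
        else t) (a, b)
      = (a + ((((ps.filter (fun p => decide (inb p))).map g).filter
              (fun v => decide (v ≠ 0 ∧ v ∈ fr))).length : Int),
         b + ((((ps.filter (fun p => decide (inb p))).map g).filter
              (fun v => decide (v = 0))).length : Int)) := by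
  intro ps
  induction ps with
  | nil => intro a b; simp
  | cons p ps ih =>
    intro a b
    rw [List.foldl_cons]
    by_cases h1 : inb p
    · by_cases h2 : g p = 0
      · simp [h1, h2, ih]; omega
      · by_cases h3 : g p ∈ fr
        · simp [h1, h2, h3, ih]; omega
        · simp [h1, h2, h3, ih]
    · simp [h1, ih]

-- fcntB does not care whether friends is deduplicated
theorem fcnt_ofList (N : Int) (friends : List Int) (room : List (List Int)) (c : Int × Int) :
    fcntB N (PySem.Set.ofList friends) room c = fcntB N friends room c := by
  unfold fcntB
  congr 2
  apply List.filter_congr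
  intro v _
  simp [PySem.Set.mem_ofList]

-- A's tmp equals B's (fcnt, ecnt)
theorem tmp_eq (N : Int) (friends : List Int) (room : List (List Int)) (i j : Int) :
    ([((0 : Int), (-1 : Int)), (0, 1), (-1, 0), (1, 0)].foldl (fun (t : Int × Int) d =>
      if 0 ≤ d.1 + i ∧ d.1 + i < N ∧ 0 ≤ d.2 + j ∧ d.2 + j < N then
        if getv room (d.1 + i) (d.2 + j) = 0 then (t.1, t.2 + 1)
        else if getv room (d.1 + i) (d.2 + j) ∈ friends then (t.1 + 1, t.2)
        else t
      else t) (0, 0)) = (fcntB N friends room (i, j), ecntB N room (i, j)) := by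
  rw [count_fold (fun d => getv room (d.1 + i) (d.2 + j))
      (fun d => 0 ≤ d.1 + i ∧ d.1 + i < N ∧ 0 ≤ d.2 + j ∧ d.2 + j < N) friends]
  have a1 : (0 : Int) + i = i := by ring
  have a2 : (-1 : Int) + j = j - 1 := by ring
  have a3 : (1 : Int) + j = j + 1 := by ring
  have a4 : (-1 : Int) + i = i - 1 := by ring
  have a5 : (1 : Int) + i = i + 1 := by ring
  simp only [fcntB, ecntB, nbrsB, List.filter_cons, List.filter_nil, a1, a2, a3, a4, a5, zero_add]
  split_ifs <;> simp [a2, a3, a4, a5]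

-- the row-major list of empty cells, shared shape of both ports
def cellsOf (N : Int) (room : List (List Int)) : List (Int × Int) :=
  (PySem.List.pyRange 0 N 1).flatMap (fun i =>
    ((PySem.List.pyRange 0 N 1).filter (fun j => decide (getv room i j = 0))).map (fun j => (i, j)))

-- the key both programs rank a cell by
def pkey (N : Int) (friends : List Int) (room : List (List Int)) (c : Int × Int) : Int × Int :=
  (fcntB N friends room c, ecntB N room c)

theorem A_fold (N : Int) (friends : List Int) (room : List (List Int))
    (init : Int × Int × Int × Int) :
    (PySem.List.pyRange 0 N 1).foldl (fun (s : Int × Int × Int × Int) i =>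
      (PySem.List.pyRange 0 N 1).foldl (fun s j =>
        if getv room i j ≠ 0 then s
        else
          let tmp : Int × Int := [((0 : Int), (-1 : Int)), (0, 1), (-1, 0), (1, 0)].foldl (fun t d =>
            let di := d.1 + i
            let dj := d.2 + j
            if 0 ≤ di ∧ di < N ∧ 0 ≤ dj ∧ dj < N then
              if getv room di dj = 0 then (t.1, t.2 + 1)
              else if getv room di dj ∈ friends then (t.1 + 1, t.2)
              else t
            else t) (0, 0)
          if s.1 < tmp.1 then (tmp.1, tmp.2, i, j)
          else if s.1 = tmp.1 ∧ s.2.1 < tmp.2 then (tmp.1, tmp.2, i, j)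
          else s) s) init
    = (cellsOf N room).foldl (stepA (pkey N friends room)) init := by
  unfold cellsOf
  rw [List.foldl_flatMap]
  congr 1
  funext s i
  rw [List.foldl_map, List.foldl_filter]
  congr 1
  funext s j
  by_cases h : getv room i j = 0
  · simp only [h, decide_true, ite_not, if_pos]
    rw [tmp_eq N friends room i j]
    simp [stepA, pkey]
  · simp [h]

theorem pkey_fst_nonneg (N : Int) (friends : List Int) (room : List (List Int)) (c : Int × Int) :
    0 ≤ (pkey N friends room c).1 := by
  simp [pkey, fcntB]

-- ===== VERDICT (by name: the statement is the Claim_ definition above) =====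
theorem check_spec : Claim_equal_check := by
  intro N friends room _ _
  unfold Spec_check
  simp only [check, check_alt]
  rw [A_fold N friends room (-1, -1, -1, -1)]
  have hcells : ((PySem.List.pyRange 0 N 1).flatMap (fun i =>
      ((PySem.List.pyRange 0 N 1).filter (fun j => decide (getv room i j = 0))).map (fun j => (i, j))))
      = cellsOf N room := rfl
  rw [hcells]
  rcases hc : cellsOf N room with - | ⟨c0, rest⟩
  · rfl
  · simp only [pickB]
    set k := pkey N friends room with hk
    set r := fmL k c0 rest with hr
    have hA : (c0 :: rest).foldl (stepA k) (-1, -1, -1, -1) = pack k r := by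
      rw [List.foldl_cons, first_step k c0 (pkey_fst_nonneg N friends room c0), fold_pack]
    have hfK : ∀ c, fcntB N (PySem.Set.ofList friends) room c = (k c).1 := by
      intro c; rw [fcnt_ofList]; rfl
    have heK : ∀ c, ecntB N room c = (k c).2 := fun c => rfl
    have hmem_r : r ∈ c0 :: rest := fmL_mem k rest c0
    have hge_r : ∀ x ∈ c0 :: rest, keyLt (k r) (k x) = false := fmL_ge k rest c0
    set bestF := (rest.map (fcntB N (PySem.Set.ofList friends) room)).foldl max
      (fcntB N (PySem.Set.ofList friends) room c0) with hbf
    have hbF_ub : ∀ x ∈ c0 :: rest, (k x).1 ≤ bestF := by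
      intro x hx
      have h := PySem.List.le_foldl_max (rest.map (fcntB N (PySem.Set.ofList friends) room))
        (fcntB N (PySem.Set.ofList friends) room c0)
      rcases List.mem_cons.1 hx with h' | h'
      · subst h'; rw [← hfK]; exact h.1
      · rw [← hfK]; exact h.2 _ (List.mem_map_of_mem h')
    have hbF_mem : ∃ x ∈ c0 :: rest, (k x).1 = bestF := by
      rcases PySem.List.foldl_max_mem (rest.map (fcntB N (PySem.Set.ofList friends) room))
        (fcntB N (PySem.Set.ofList friends) room c0) with h | h
      · exact ⟨c0, by simp, by rw [← hfK, ← h]⟩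
      · rcases List.mem_map.1 h with ⟨x, hx, hxe⟩
        exact ⟨x, by simp [hx], by rw [← hfK, hxe]⟩
    have hrF : (k r).1 = bestF := by
      rcases hbF_mem with ⟨x, hx, hxe⟩
      have h1 := hbF_ub r hmem_r
      have h2 := hge_r x hx
      rw [Bool.eq_false_iff, ne_eq, keyLt_iff] at h2
      omega
    have hr_tier : r ∈ (c0 :: rest).filter (fun c => fcntB N (PySem.Set.ofList friends) room c == bestF) := by
      rw [List.mem_filter]
      exact ⟨hmem_r, by rw [hfK, hrF]; simp⟩
    rcases ht : (c0 :: rest).filter (fun c => fcntB N (PySem.Set.ofList friends) room c == bestF)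
      with - | ⟨t0, trest⟩
    · rw [ht] at hr_tier; simp at hr_tier
    · rw [ht] at hr_tier
      have htier_sub : ∀ x ∈ t0 :: trest, x ∈ c0 :: rest ∧ (k x).1 = bestF := by
        intro x hx
        rw [← ht, List.mem_filter] at hx
        refine ⟨hx.1, ?_⟩
        have h := hx.2
        rw [hfK] at h
        exact beq_iff_eq.1 h
      simp only [tierPick]
      set bestE := (trest.map (ecntB N room)).foldl max (ecntB N room t0) with hbe
      have hbE_ub : ∀ x ∈ t0 :: trest, (k x).2 ≤ bestE := by
        intro x hx
        have h := PySem.List.le_foldl_max (trest.map (ecntB N room)) (ecntB N room t0)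
        rcases List.mem_cons.1 hx with h' | h'
        · subst h'; exact h.1
        · exact h.2 _ (List.mem_map_of_mem h')
      have hbE_mem : ∃ x ∈ t0 :: trest, (k x).2 = bestE := by
        rcases PySem.List.foldl_max_mem (trest.map (ecntB N room)) (ecntB N room t0) with h | h
        · exact ⟨t0, by simp, h.symm⟩
        · rcases List.mem_map.1 h with ⟨x, hx, hxe⟩
          exact ⟨x, by simp [hx], hxe⟩
      have hrE : (k r).2 = bestE := by
        rcases hbE_mem with ⟨x, hx, hxe⟩
        have h1 := hbE_ub r hr_tier
        have h2 := hge_r x (htier_sub x hx).1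
        have h3 := (htier_sub x hx).2
        have h4 : (k r).1 = bestF := hrF
        rw [Bool.eq_false_iff, ne_eq, keyLt_iff] at h2
        omega
      have hfind : (t0 :: trest).find? (fun c => ecntB N room c == bestE) = some r := by
        rw [← ht, List.find?_filter]
        have hpred : (fun a => decide ((fun c => fcntB N (PySem.Set.ofList friends) room c == bestF) a = true
            ∧ (fun c => ecntB N room c == bestE) a = true)) = (fun x => k x == k r) := by
          funext x
          rw [Bool.eq_iff_iff]
          simp only [decide_eq_true_eq, beq_iff_eq, Prod.ext_iff, hfK, heK, hrF, hrE]
        rw [hpred]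
        exact find_head k c0 rest
      rw [hA, hfind]
      rfl
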